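-- pv_equiv track=rewrite | github.com/vxda7/pycharm | Algorithm 190822 linklist/flyhangle.py | giug
-- ===== SOURCE A (Python) =====
-- def giug(N, M, space):
--     best = 0
--     for i in range(N-M+1):
--         for j in range(N-M+1):
--             catch = 0
--
--             for k in range(M):
--                 catch += space[i][j+k]
--                 catch += space[i+k][j+M-1]
--             catch -= space[i][j+M-1]
--             if catch > best:
--                 best = catch
--     return best
-- ===== SOURCE B (Python) =====
-- def giug(N, M, space):
--     if N - M + 1 <= 0:
--         return 0
--     rp = [_prefix([space[i][j] for j in range(N)]) for i in range(N)]
--     cp = [_prefix([space[i][j] for i in range(N)]) for j in range(N)]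
--     best = 0
--     for i in range(N - M + 1):
--         for j in range(N - M + 1):
--             c = (rp[i][j + M] - rp[i][j]
--                  + cp[j + M - 1][i + M] - cp[j + M - 1][i]
--                  - space[i][j + M - 1])
--             if c > best:
--                 best = c
--     return best
--
--
-- def _prefix(xs):
--     p = [0]
--     for x in xs:
--         p.append(p[-1] + x)
--     return p
-- ===== Notes on version B (the rewrite author's own statement) =====
-- stated objective: alternative
-- what changed: B precomputes row and column prefix-sum tables once and evaluates each MxM window border sum by prefix differences, instead of A's inner O(M) accumulation loop per window.
-- outside the precondition, e.g. on giug(1, 0, [[-5], [-6]]): A returns 6, B raises IndexError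
import Mathlib
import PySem

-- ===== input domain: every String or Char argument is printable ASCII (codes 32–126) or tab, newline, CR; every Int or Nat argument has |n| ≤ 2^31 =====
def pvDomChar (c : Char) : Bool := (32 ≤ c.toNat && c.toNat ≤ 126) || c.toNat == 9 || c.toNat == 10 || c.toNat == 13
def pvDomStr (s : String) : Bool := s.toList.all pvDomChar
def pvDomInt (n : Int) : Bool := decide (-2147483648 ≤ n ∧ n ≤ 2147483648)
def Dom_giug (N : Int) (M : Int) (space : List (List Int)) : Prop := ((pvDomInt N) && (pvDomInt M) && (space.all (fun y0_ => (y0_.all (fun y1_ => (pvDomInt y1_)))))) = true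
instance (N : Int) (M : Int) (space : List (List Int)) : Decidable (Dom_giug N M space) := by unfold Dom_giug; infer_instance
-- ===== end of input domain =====

-- B replaces A's inner per-window border loop by row/column prefix-sum tables queried by
-- prefix differences (a different, prefix-sum algorithm); A = B is proved on Pre_giug.


-- space[i][j] (both ports read cells through this; the 0 default is never reached inside Pre_giug)
def pvCell (space : List (List Int)) (i j : Int) : Int :=
  PySem.List.pyGetD (PySem.List.pyGetD space i []) j 0

-- ===== PORT A =====
def giug (N : Int) (M : Int) (space : List (List Int)) : Int :=
  (PySem.List.pyRange 0 (N - M + 1) 1).foldl (fun best i =>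
    (PySem.List.pyRange 0 (N - M + 1) 1).foldl (fun best j =>
      let c :=
        ((PySem.List.pyRange 0 M 1).foldl (fun c k =>
          c + pvCell space i (j + k) + pvCell space (i + k) (j + M - 1)) 0)
        - pvCell space i (j + M - 1)
      if c > best then c else best) best) 0

-- ===== PORT B =====
-- _prefix(xs): p = [0]; for x in xs: p.append(p[-1] + x); return p
def pvPrefix (xs : List Int) : List Int :=
  xs.foldl (fun p x => p ++ [PySem.List.pyGetD p (-1) 0 + x]) [0]

def giug_alt (N : Int) (M : Int) (space : List (List Int)) : Int :=
  if N - M + 1 ≤ 0 then 0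
  else
    let rp := (PySem.List.pyRange 0 N 1).map (fun i =>
      pvPrefix ((PySem.List.pyRange 0 N 1).map (fun j => pvCell space i j)))
    let cp := (PySem.List.pyRange 0 N 1).map (fun j =>
      pvPrefix ((PySem.List.pyRange 0 N 1).map (fun i => pvCell space i j)))
    (PySem.List.pyRange 0 (N - M + 1) 1).foldl (fun best i =>
      (PySem.List.pyRange 0 (N - M + 1) 1).foldl (fun best j =>
        let c := PySem.List.pyGetD (PySem.List.pyGetD rp i []) (j + M) 0
               - PySem.List.pyGetD (PySem.List.pyGetD rp i []) j 0
               + PySem.List.pyGetD (PySem.List.pyGetD cp (j + M - 1) []) (i + M) 0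
               - PySem.List.pyGetD (PySem.List.pyGetD cp (j + M - 1) []) i 0
               - pvCell space i (j + M - 1)
        if c > best then c else best) best) 0

-- ===== PRECONDITION & SPEC =====
-- Pre_ excludes the inputs where Python A raises IndexError (a window position indexes a missing
-- row/column of the N×N grid), and the non-positive window sizes M with N ≥ M, where A's returned
-- value (and B's IndexError) arise from accidental Python negative-index wraparound on space[i][j+M-1].
def Pre_giug (N : Int) (M : Int) (space : List (List Int)) : Prop :=
  N < M ∨ (1 ≤ M ∧ N ≤ (space.length : Int) ∧ ∀ row ∈ space.take N.toNat, N ≤ (row.length : Int))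
instance (N : Int) (M : Int) (space : List (List Int)) : Decidable (Pre_giug N M space) := by unfold Pre_giug; infer_instance

def pvWitness_giug : Int × Int × List (List Int) := (2, 1, [[1, 2], [3, 4]])

def Spec_giug (N : Int) (M : Int) (space : List (List Int)) (out : Int) : Prop := out = giug_alt N M space
instance (N : Int) (M : Int) (space : List (List Int)) (out : Int) : Decidable (Spec_giug N M space out) := by unfold Spec_giug; infer_instance

-- ===== CLAIM (what is proved, stated in full; the proofs are below) =====
def Claim_equal_giug : Prop := ∀ (N : Int) (M : Int) (space : List (List Int)), Dom_giug N M space → Pre_giug N M space → Spec_giug N M space (giug N M space)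

-- ===== LEMMAS AND PROOFS =====

-- B's prefix loop in closed form
lemma pvPrefix_loop (xs : List Int) : ∀ (p : List Int), p ≠ [] →
    xs.foldl (fun p x => p ++ [PySem.List.pyGetD p (-1) 0 + x]) p
      = p ++ (List.range xs.length).map (fun t => p.getLastD 0 + ((xs.take (t + 1)).sum)) := by
  induction xs with
  | nil => simp
  | cons x xs ih =>
    intro p hp
    simp only [List.foldl_cons]
    rw [PySem.List.pyGetD_neg_one p 0 hp]
    rw [ih (p ++ [p.getLast hp + x]) (by simp)]
    rw [List.length_cons, List.range_succ_eq_map]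
    simp [List.map_map, Function.comp, List.getLast?_eq_some_getLast hp, add_assoc]

-- entry t of a prefix table is the sum of the first t inputs
lemma pvPrefix_getD (xs : List Int) (t : Nat) (ht : t ≤ xs.length) :
    (pvPrefix xs).getD t 0 = (xs.take t).sum := by
  unfold pvPrefix
  rw [pvPrefix_loop xs [0] (by simp)]
  cases t with
  | zero => simp
  | succ u =>
    have hu : u < xs.length := by omega
    have : ([(0:Int)] ++ (List.range xs.length).map (fun t => ([(0:Int)].getLastD 0) + ((xs.take (t + 1)).sum))).getD (u+1) 0
        = ((List.range xs.length).map (fun t => ([(0:Int)].getLastD 0) + ((xs.take (t + 1)).sum))).getD u 0 := by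
      simp
    rw [this, PySem.List.getD_map_range _ _ _ _ hu]
    simp

-- looking up index t of the prefix table of [h(0), …, h(n-1)] gives Σ_{k<t} h(k)
lemma sumTo (h : Int → Int) (n t : Nat) (ht : t ≤ n) :
    PySem.List.pyGetD (pvPrefix ((PySem.List.pyRange 0 (n : Int) 1).map h)) (t : Int) 0
      = ((List.range t).map (fun k : Nat => h (k : Int))).sum := by
  rw [PySem.List.pyGetD_natCast]
  rw [PySem.List.pyRange_zero_natCast, List.map_map]
  rw [pvPrefix_getD _ t (by simp [ht]), ← List.map_take, List.take_range, Nat.min_eq_left ht]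
  simp [Function.comp_def]

-- a prefix difference is the sum over the window's index segment
lemma sumDiff (F : Nat → Int) (b m : Nat) :
    ((List.range (b + m)).map F).sum - ((List.range b).map F).sum
      = ((List.range m).map (fun k => F (b + k))).sum := by
  rw [List.range_add, List.map_append, List.sum_append, List.map_map]
  ring_nf
  rfl

-- A's inner loop accumulates two sums at once
lemma foldl_add2 {α : Type} (F G : α → Int) (l : List α) : ∀ c : Int,
    l.foldl (fun c k => c + F k + G k) c = c + (l.map F).sum + (l.map G).sum := by
  induction l with
  | nil => simp
  | cons x l ih => intro c; simp only [List.foldl_cons, List.map_cons, List.sum_cons, ih]; ring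

-- one window: A's border loop equals B's prefix-difference expression
lemma window_eq (space : List (List Int)) (n m a b : Nat)
    (hm : 1 ≤ m) (ham : a + m ≤ n) (hbm : b + m ≤ n) :
    ((PySem.List.pyRange 0 (m : Int) 1).foldl (fun c k =>
        c + pvCell space (a : Int) ((b : Int) + k) + pvCell space ((a : Int) + k) ((b : Int) + (m : Int) - 1)) 0)
      - pvCell space (a : Int) ((b : Int) + (m : Int) - 1)
    = PySem.List.pyGetD (PySem.List.pyGetD
        ((PySem.List.pyRange 0 (n : Int) 1).map (fun i =>
          pvPrefix ((PySem.List.pyRange 0 (n : Int) 1).map (fun j => pvCell space i j)))) (a : Int) []) ((b : Int) + (m : Int)) 0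
      - PySem.List.pyGetD (PySem.List.pyGetD
        ((PySem.List.pyRange 0 (n : Int) 1).map (fun i =>
          pvPrefix ((PySem.List.pyRange 0 (n : Int) 1).map (fun j => pvCell space i j)))) (a : Int) []) (b : Int) 0
      + PySem.List.pyGetD (PySem.List.pyGetD
        ((PySem.List.pyRange 0 (n : Int) 1).map (fun j =>
          pvPrefix ((PySem.List.pyRange 0 (n : Int) 1).map (fun i => pvCell space i j)))) ((b : Int) + (m : Int) - 1) []) ((a : Int) + (m : Int)) 0
      - PySem.List.pyGetD (PySem.List.pyGetD
        ((PySem.List.pyRange 0 (n : Int) 1).map (fun j =>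
          pvPrefix ((PySem.List.pyRange 0 (n : Int) 1).map (fun i => pvCell space i j)))) ((b : Int) + (m : Int) - 1) []) (a : Int) 0
      - pvCell space (a : Int) ((b : Int) + (m : Int) - 1) := by
  rw [show ((b:Int) + (m:Int)) = ((b + m : Nat) : Int) by push_cast; ring]
  rw [show ((a:Int) + (m:Int)) = ((a + m : Nat) : Int) by push_cast; ring]
  rw [show (((b + m : Nat) : Int) - 1) = ((b + m - 1 : Nat) : Int) by omega]
  rw [PySem.List.pyGetD_map_pyRange _ n a [] (by omega)]
  rw [PySem.List.pyGetD_map_pyRange _ n (b + m - 1) [] (by omega)]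
  rw [sumTo _ n (b + m) (by omega), sumTo _ n b (by omega),
      sumTo _ n (a + m) (by omega), sumTo _ n a (by omega)]
  rw [PySem.List.pyRange_zero_natCast, List.foldl_map]
  rw [foldl_add2 (fun k : Nat => pvCell space (a : Int) ((b : Int) + (k : Int)))
        (fun k : Nat => pvCell space ((a : Int) + (k : Int)) ((b + m - 1 : Nat) : Int)) (List.range m) 0]
  have hrow : ((List.range (b + m)).map (fun k : Nat => pvCell space (a : Int) (k : Int))).sum
      - ((List.range b).map (fun k : Nat => pvCell space (a : Int) (k : Int))).sum
      = ((List.range m).map (fun k : Nat => pvCell space (a : Int) ((b : Int) + (k : Int)))).sum := by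
    rw [sumDiff]
    refine congrArg List.sum (List.map_congr_left ?_)
    intro k _; push_cast; ring_nf
  have hcol : ((List.range (a + m)).map (fun k : Nat => pvCell space (k : Int) ((b + m - 1 : Nat) : Int))).sum
      - ((List.range a).map (fun k : Nat => pvCell space (k : Int) ((b + m - 1 : Nat) : Int))).sum
      = ((List.range m).map (fun k : Nat => pvCell space ((a : Int) + (k : Int)) ((b + m - 1 : Nat) : Int))).sum := by
    rw [sumDiff]
    refine congrArg List.sum (List.map_congr_left ?_)
    intro k _; push_cast; ring_nf
  rw [← hrow, ← hcol]
  ring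

-- ===== VERDICT (by name: the statement is the Claim_ definition above) =====
theorem giug_spec : Claim_equal_giug := by
  intro N M space _ hPre
  unfold Spec_giug giug giug_alt
  by_cases hK : N - M + 1 ≤ 0
  · rw [if_pos hK, PySem.List.pyRange_one_eq_nil hK]
    simp
  · rw [if_neg hK]
    have hMN : M ≤ N := by omega
    have hM : 1 ≤ M := by
      rcases hPre with h | ⟨h, _⟩
      · omega
      · exact h
    obtain ⟨m, hm⟩ : ∃ m : Nat, M = (m : Int) := ⟨M.toNat, by omega⟩
    obtain ⟨n, hn⟩ : ∃ n : Nat, N = (n : Int) := ⟨N.toNat, by omega⟩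
    subst hm hn
    apply PySem.List.foldl_congr_mem
    intro best i hi
    apply PySem.List.foldl_congr_mem
    intro best' j hj
    rw [PySem.List.mem_pyRange_one] at hi hj
    obtain ⟨a, ha⟩ : ∃ a : Nat, i = (a : Int) := ⟨i.toNat, by omega⟩
    obtain ⟨b, hb⟩ : ∃ b : Nat, j = (b : Int) := ⟨j.toNat, by omega⟩
    subst ha hb
    rw [window_eq space n m a b (by omega) (by omega) (by omega)]
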